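-- pv_equiv track=rewrite | github.com/mhd329/study-personal | lv2/뉴스클러스터링/0.py | mklist
-- ===== SOURCE A (Python) =====
-- def mklist(s):
--     s = s.upper()
--     l = len(s)
--     parts = []
--     for i in range(l - 1):
--         part = s[i:i + 2]
--         for j in part:
--             n = ord(j)
--             if not 64 < n < 91:
--                 break
--         else:
--             parts.append(part)
--     return parts
-- ===== SOURCE B (Python) =====
-- def mklist(s):
--     # Run-based algorithm: accumulate maximal uppercase runs in one pass and,
--     # whenever a run ends (sentinel ' ' flushes the last one), emit the
--     # consecutive pairs inside it.
--     parts = []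
--     run = []
--     for c in s.upper() + ' ':
--         if 'A' <= c <= 'Z':
--             run.append(c)
--         else:
--             for k in range(len(run) - 1):
--                 parts.append(run[k] + run[k + 1])
--             run = []
--     return parts
-- ===== Notes on version B (the rewrite author's own statement) =====
-- stated objective: alternative
-- what changed: Instead of testing every 2-char window with an inner character loop, B accumulates maximal runs of ASCII uppercase letters in a single pass (flushed by a sentinel) and emits the consecutive pairs inside each run.
import Mathlib
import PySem

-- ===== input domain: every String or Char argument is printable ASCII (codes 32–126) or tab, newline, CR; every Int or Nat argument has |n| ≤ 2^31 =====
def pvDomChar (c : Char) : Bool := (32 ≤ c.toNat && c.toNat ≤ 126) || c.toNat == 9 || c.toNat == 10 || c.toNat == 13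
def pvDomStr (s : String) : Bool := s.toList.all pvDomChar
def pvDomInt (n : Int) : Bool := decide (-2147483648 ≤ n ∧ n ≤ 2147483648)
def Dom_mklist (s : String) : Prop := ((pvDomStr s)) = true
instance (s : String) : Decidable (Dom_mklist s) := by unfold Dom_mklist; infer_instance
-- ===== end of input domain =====

-- B replaces A's per-window scan by a run-based single pass: accumulate maximal
-- ASCII-uppercase runs (sentinel-flushed) and emit the consecutive pairs inside each run (alternative).


-- ===== PORT A =====
-- the inner 'for j in part: … break / else: append' loop, as a Boolean: false iff it breaks
def mklistInner (part : List Char) : Bool :=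
  match part with
  | [] => true
  | j :: rest =>
      let n := (j.toNat : Int)
      if !(decide (64 < n ∧ n < 91)) then false else mklistInner rest

def mklist (s : String) : List String :=
  let s' := PySem.Chars.upper s.toList
  let l := PySem.Chars.len s'
  (PySem.List.pyRange 0 (l - 1) 1).foldl
    (fun parts i =>
      let part := PySem.List.slice s' (some i) (some (i + 2))
      if mklistInner part then parts ++ [String.ofList part] else parts)
    []

-- ===== PORT B =====
def isUp (c : Char) : Bool := decide ('A' ≤ c ∧ c ≤ 'Z')

-- the flush loop 'for k in range(len(run) - 1): parts.append(run[k] + run[k+1])';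
-- the indices k, k+1 are always in range, so getD with a dummy default is exact for run[k]
def emitRun (r : List Char) : List String :=
  (List.range (r.length - 1)).map
    (fun k => String.ofList [r.getD k ' ', r.getD (k + 1) ' '])

def mklist_alt (s : String) : List String :=
  ((PySem.Chars.upper s.toList ++ [' ']).foldl
      (fun (st : List String × List Char) c =>
        if isUp c then (st.1, st.2 ++ [c]) else (st.1 ++ emitRun st.2, []))
      ([], [])).1

-- ===== PRECONDITION & SPEC =====
def Spec_mklist (s : String) (out : List String) : Prop := out = mklist_alt s
instance (s : String) (out : List String) : Decidable (Spec_mklist s out) := by unfold Spec_mklist; infer_instance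

-- ===== CLAIM (what is proved, stated in full; the proofs are below) =====
def Claim_equal_mklist : Prop := ∀ (s : String), Dom_mklist s → Spec_mklist s (mklist s)

-- ===== LEMMAS AND PROOFS =====

-- common characterization: the filtered overlapping pairs of u
def zipForm (u : List Char) : List String :=
  ((u.zip u.tail).filter (fun p => isUp p.1 && isUp p.2)).map
    (fun p => String.ofList [p.1, p.2])

-- the length-2 windows of u, by index, are the zip of u with its tail
theorem windows_eq_zip (u : List Char) :
    (List.range (u.length - 1)).map (fun k => (u.drop k).take 2)
      = (u.zip u.tail).map (fun p => [p.1, p.2]) := by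
  induction u with
  | nil => simp
  | cons a rest ih =>
    cases rest with
    | nil => simp
    | cons b rest' =>
      have h : (a :: b :: rest').length - 1 = ((b :: rest').length - 1) + 1 := by
        simp [List.length_cons]
      rw [h, List.range_succ_eq_map, List.map_cons, List.map_map]
      have : ((List.range ((b :: rest').length - 1)).map
                (fun k => ((a :: b :: rest').drop (k + 1)).take 2))
            = (List.range ((b :: rest').length - 1)).map
                (fun k => ((b :: rest').drop k).take 2) := by
        apply List.map_congr_left; intro k _; rfl
      simpa [Function.comp_def, this] using congrArg (List.cons [a, b]) (ih)

-- the two element tests agree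
theorem charTest (c : Char) :
    (decide (64 < (c.toNat : Int) ∧ (c.toNat : Int) < 91)) = isUp c := by
  unfold isUp
  apply decide_eq_decide.mpr
  have hA : ('A'.val).toNat = 65 := rfl
  have hZ : ('Z'.val).toNat = 90 := rfl
  simp only [Char.le_def, UInt32.le_iff_toNat_le, Char.toNat, hA, hZ]
  omega

theorem test_eq (a b : Char) :
    (mklistInner [a, b]) = (isUp a && isUp b) := by
  simp only [mklistInner, charTest]
  cases hA : isUp a <;> cases hB : isUp b <;> simp

theorem tail_lemma (u : List Char) :
    ((List.range (u.length - 1)).filter (fun k => mklistInner ((u.drop k).take 2))).map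
        (fun k => String.ofList ((u.drop k).take 2))
      = zipForm u := by
  have h := congrArg (fun l => (l.filter mklistInner).map String.ofList) (windows_eq_zip u)
  simp only [List.filter_map, List.map_map, Function.comp_def] at h
  unfold zipForm
  simpa only [test_eq] using h

-- A computes zipForm of the uppercased characters
theorem mklist_eq_zipForm (s : String) : mklist s = zipForm (PySem.Chars.upper s.toList) := by
  unfold mklist
  set u := PySem.Chars.upper s.toList with hu
  simp only [PySem.Chars.len_eq]
  rw [PySem.List.pyRange_one]
  simp only [Int.sub_zero, Int.zero_add]
  have hnat : ((u.length : Int) - 1).toNat = u.length - 1 := by omega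
  rw [hnat, List.foldl_map]
  have hslice : ∀ k : Nat, PySem.List.slice u (some (k : Int)) (some ((k : Int) + 2))
      = (u.drop k).take 2 := by
    intro k
    have h2 : ((k : Int) + 2) = (((k + 2 : Nat) : Int)) := by push_cast; ring
    rw [h2, PySem.List.slice_natCast]
    congr 1; omega
  simp only [hslice]
  rw [PySem.List.foldl_append_if]
  simpa using tail_lemma u

-- zipForm unfolds one step at a time
theorem zipForm_cons (a b : Char) (t : List Char) :
    zipForm (a :: b :: t)
      = (if isUp a && isUp b then [String.ofList [a, b]] else []) ++ zipForm (b :: t) := by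
  unfold zipForm
  by_cases h : (isUp a && isUp b) = true <;> simp [h]

-- the flush loop's indexed pairs are the zip of the run with its tail
theorem getD_range_zip (r : List Char) :
    (List.range (r.length - 1)).map (fun k => (r.getD k ' ', r.getD (k + 1) ' '))
      = r.zip r.tail := by
  induction r with
  | nil => simp
  | cons a rest ih =>
    cases rest with
    | nil => simp
    | cons b t =>
      have h : (a :: b :: t).length - 1 = ((b :: t).length - 1) + 1 := by
        simp [List.length_cons]
      rw [h, List.range_succ_eq_map, List.map_cons, List.map_map]
      have h2 : ((List.range ((b :: t).length - 1)).map
            (fun k => ((a :: b :: t).getD (k + 1) ' ', (a :: b :: t).getD (k + 2) ' ')))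
          = (List.range ((b :: t).length - 1)).map
            (fun k => ((b :: t).getD k ' ', (b :: t).getD (k + 1) ' ')) := by
        apply List.map_congr_left; intro k _; rfl
      simpa [Function.comp_def, h2] using congrArg (List.cons (a, b)) ih

-- on an all-uppercase run the flush loop produces exactly zipForm of the run
theorem emit_allUp (r : List Char) (h : ∀ x ∈ r, isUp x = true) :
    emitRun r = zipForm r := by
  have hf : (r.zip r.tail).filter (fun p => isUp p.1 && isUp p.2) = r.zip r.tail := by
    apply List.filter_eq_self.mpr
    intro p hp
    obtain ⟨h1, h2⟩ := List.of_mem_zip hp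
    rw [h p.1 h1, h p.2 (List.mem_of_mem_tail h2)]
    rfl
  unfold emitRun zipForm
  rw [hf, ← getD_range_zip, List.map_map]
  rfl

-- a non-uppercase head contributes nothing to zipForm
theorem zipForm_cons_notUp (c : Char) (hc : isUp c = false) (ys : List Char) :
    zipForm (c :: ys) = zipForm ys := by
  cases ys with
  | nil => simp [zipForm]
  | cons b t => rw [zipForm_cons]; simp [hc]

-- a non-uppercase character splits zipForm
theorem zipForm_break (c : Char) (hc : isUp c = false) :
    ∀ xs ys : List Char, zipForm (xs ++ c :: ys) = zipForm xs ++ zipForm ys := by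
  intro xs
  induction xs with
  | nil =>
    intro ys
    simpa using zipForm_cons_notUp c hc ys
  | cons a xs' ih =>
    intro ys
    cases xs' with
    | nil =>
      rw [List.cons_append, List.nil_append, zipForm_cons,
          zipForm_cons_notUp c hc ys]
      simp [hc, zipForm]
    | cons x xs'' =>
      have h1 : (a :: x :: xs'') ++ c :: ys = a :: ((x :: xs'') ++ c :: ys) := rfl
      have h2 : (x :: xs'') ++ c :: ys = x :: (xs'' ++ c :: ys) := rfl
      rw [h1, h2, zipForm_cons, ← h2, ih, zipForm_cons, List.append_assoc]

-- loop invariant: folding the rest of the input (plus sentinel) over a partial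
-- all-uppercase run yields the parts so far plus zipForm of run ++ rest
theorem fold_inv (v : List Char) :
    ∀ (run : List Char) (parts : List String), (∀ x ∈ run, isUp x = true) →
      ((v ++ [' ']).foldl
          (fun (st : List String × List Char) c =>
            if isUp c then (st.1, st.2 ++ [c]) else (st.1 ++ emitRun st.2, []))
          (parts, run)).1
        = parts ++ zipForm (run ++ v) := by
  induction v with
  | nil =>
    intro run parts h
    have : isUp ' ' = false := by decide
    simp [this, emit_allUp run h]
  | cons c v' ih =>
    intro run parts h
    by_cases hc : isUp c = true
    · rw [List.cons_append, List.foldl_cons]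
      simp only [hc, if_true]
      rw [ih (run ++ [c]) parts (by
        intro x hx
        rcases List.mem_append.mp hx with hx | hx
        · exact h x hx
        · simpa [List.mem_singleton.mp hx] using hc)]
      rw [List.append_assoc]
      rfl
    · have hcf : isUp c = false := by simpa using hc
      rw [List.cons_append, List.foldl_cons]
      simp only [hcf, Bool.false_eq_true, if_false]
      rw [ih [] (parts ++ emitRun run) (by intro x hx; simp at hx)]
      rw [zipForm_break c hcf run v', emit_allUp run h,
          List.nil_append, List.append_assoc]

-- B computes zipForm too
theorem mklist_alt_eq_zipForm (s : String) :
    mklist_alt s = zipForm (PySem.Chars.upper s.toList) := by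
  unfold mklist_alt
  rw [fold_inv (PySem.Chars.upper s.toList) [] [] (by intro x hx; simp at hx)]
  simp

-- ===== VERDICT (by name: the statement is the Claim_ definition above) =====
theorem mklist_spec : Claim_equal_mklist := by
  intro s _
  unfold Spec_mklist
  rw [mklist_eq_zipForm, mklist_alt_eq_zipForm]
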